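-- pv_equiv track=rewrite | github.com/Haotian9850/ideal-umbrella | utils/Utils.py | fix_json_string
-- ===== SOURCE A (Python) =====
-- def fix_json_string(json_string):
--     # Find the positions where commas should be added
--     json_string = json_string.replace("```json", "").replace("```", "")
--
--     positions = []
--     inside_quotes = False
--     for i in range(len(json_string) - 1):
--         if json_string[i] == '"':
--             inside_quotes = not inside_quotes
--         if not inside_quotes and json_string[i] == '"' and json_string[i+1] in {" ", "\n"}:
--             positions.append(i + 1)
--
--     # Add commas at the identified positions
--     fixed_json_list = list(json_string)
--
--     if positions:
--         for pos in reversed(positions[:-1]):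
--             fixed_json_list.insert(pos, ',')
--
--         return ''.join(fixed_json_list)
--
--     return json_string
-- ===== SOURCE B (Python) =====
-- def fix_json_string(json_string):
--     # One pass: cut the string into segments right after each closing quote
--     # followed by space/newline, then join all but the last boundary with commas.
--     s = json_string.replace("```json", "").replace("```", "")
--     done = []
--     cur = []
--     inside = False
--     for c, nxt in zip(s, s[1:]):
--         if c == '"':
--             inside = not inside
--         cur.append(c)
--         if c == '"' and not inside and nxt in (' ', '\n'):
--             done.append(''.join(cur))
--             cur = []
--     if s:
--         cur.append(s[-1])
--     done.append(''.join(cur))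
--     return ','.join(done[:-1]) + done[-1]
-- ===== Notes on version B (the rewrite author's own statement) =====
-- stated objective: alternative
-- what changed: Instead of collecting absolute comma positions and then splicing commas into a character list by repeated list.insert in reverse, B cuts the string into segments at each closing-quote/whitespace boundary in a single zip(s, s[1:]) pass and rebuilds the result by joining all but the last segment with commas.
import Mathlib
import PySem

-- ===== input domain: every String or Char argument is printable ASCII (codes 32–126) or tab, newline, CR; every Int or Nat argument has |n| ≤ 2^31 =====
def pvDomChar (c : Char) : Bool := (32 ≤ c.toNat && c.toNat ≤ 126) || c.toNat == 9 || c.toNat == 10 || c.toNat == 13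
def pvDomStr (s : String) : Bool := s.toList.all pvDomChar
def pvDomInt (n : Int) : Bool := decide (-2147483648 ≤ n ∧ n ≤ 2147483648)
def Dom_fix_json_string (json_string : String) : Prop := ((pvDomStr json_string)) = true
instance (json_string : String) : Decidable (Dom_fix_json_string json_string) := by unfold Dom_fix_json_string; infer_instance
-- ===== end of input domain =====

-- B replaces A's position-list + reversed list.insert splicing by a single-pass
-- segmentation joined with commas; equivalence is proved for all inputs (both are total).

-- ===== PORT A =====
def fix_json_string (json_string : String) : String :=
  let s := (PySem.Str.replace (PySem.Str.replace json_string "```json" "") "```" "").toList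
  let r := (PySem.List.pyRange 0 ((s.length : Int) - 1) 1).foldl
    (fun (st : List Int × Bool) (i : Int) =>
      let inside := if PySem.List.pyGetD s i ' ' == '"' then !st.2 else st.2
      let ps := if !inside && (PySem.List.pyGetD s i ' ' == '"')
                   && (PySem.List.pyGetD s (i+1) '_' == ' ' || PySem.List.pyGetD s (i+1) '_' == '\n')
                then st.1 ++ [i+1] else st.1
      (ps, inside))
    ([], false)
  let positions := r.1
  if positions ≠ [] then
    String.ofList ((positions.dropLast.reverse).foldl
      (fun acc p => PySem.List.insert acc p ',') s)
  else
    String.ofList s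

-- ===== PORT B =====
-- loop body of B's single pass (a named helper of the port)
def pvStepB : List (List Char) × List Char × Bool → Char × Char → List (List Char) × List Char × Bool :=
  fun st p =>
    let inside := if p.1 == '"' then !st.2.2 else st.2.2
    let cur := st.2.1 ++ [p.1]
    if p.1 == '"' && !inside && (p.2 == ' ' || p.2 == '\n')
    then (st.1 ++ [cur], ([], inside))
    else (st.1, (cur, inside))

def fix_json_string_alt (json_string : String) : String :=
  let s := (PySem.Str.replace (PySem.Str.replace json_string "```json" "") "```" "").toList
  let r := (s.zip (PySem.List.slice s (some 1) none)).foldl pvStepB ([], ([], false))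
  let cur := match PySem.List.pyGet? s (-1) with
    | some c => r.2.1 ++ [c]
    | none => r.2.1
  let done := r.1 ++ [cur]
  String.ofList (PySem.Chars.join [','] done.dropLast ++ done.getLastD [])

-- ===== PRECONDITION & SPEC =====
def Spec_fix_json_string (json_string : String) (out : String) : Prop := out = fix_json_string_alt json_string
instance (json_string : String) (out : String) : Decidable (Spec_fix_json_string json_string out) := by unfold Spec_fix_json_string; infer_instance

-- ===== CLAIM (what is proved, stated in full; the proofs are below) =====
def Claim_equal_fix_json_string : Prop := ∀ (json_string : String), Dom_fix_json_string json_string → Spec_fix_json_string json_string (fix_json_string json_string)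

-- ===== LEMMAS AND PROOFS =====

-- ---- proof-side helpers ----
def pvTog (inside : Bool) (c : Char) : Bool := if c == '"' then !inside else inside

def pvIsB (i : Bool) (c d : Char) : Bool := !i && (c == '"') && (d == ' ' || d == '\n')

def pvConsHead (cur : List Char) : List (List Char) → List (List Char)
  | [] => [cur]
  | g :: gs => (cur ++ g) :: gs

def pvSegs (inside : Bool) : List Char → List (List Char)
  | [] => [[]]
  | [c] => [[c]]
  | c :: d :: rest =>
      if pvIsB (pvTog inside c) c d then [c] :: pvSegs (pvTog inside c) (d :: rest)
      else pvConsHead [c] (pvSegs (pvTog inside c) (d :: rest))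

def pvPos (k : Int) (inside : Bool) : List Char → List Int
  | [] => []
  | [_] => []
  | c :: d :: rest =>
      (if pvIsB (pvTog inside c) c d then [k + 1] else []) ++ pvPos (k + 1) (pvTog inside c) (d :: rest)

def pvCums (k : Int) : List (List Char) → List Int
  | [] => []
  | [_] => []
  | g :: gs => (k + g.length) :: pvCums (k + g.length) gs

lemma pvConsHead_assoc (a b : List Char) (gs : List (List Char)) :
    pvConsHead a (pvConsHead b gs) = pvConsHead (a ++ b) gs := by
  cases gs <;> simp [pvConsHead]

lemma pvSegs_ne (inside : Bool) (l : List Char) : pvSegs inside l ≠ [] := by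
  match l with
  | [] => simp [pvSegs]
  | [c] => simp [pvSegs]
  | c :: d :: rest =>
      simp only [pvSegs]
      split
      · simp
      · cases pvSegs (pvTog inside c) (d :: rest) <;> simp [pvConsHead]

lemma pvConsHead_flatten (cur : List Char) (gs : List (List Char)) :
    (pvConsHead cur gs).flatten = cur ++ gs.flatten := by
  cases gs <;> simp [pvConsHead]

lemma pvSegs_flatten (inside : Bool) (l : List Char) : (pvSegs inside l).flatten = l := by
  induction l generalizing inside with
  | nil => simp [pvSegs]
  | cons c rest ih =>
      cases rest with
      | nil => simp [pvSegs]
      | cons d rest' =>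
          simp only [pvSegs]
          split
          · simp [ih]
          · simp [pvConsHead_flatten, ih]

lemma pvPos_short (k : Int) (inside : Bool) (l : List Char) (h : l.length ≤ 1) :
    pvPos k inside l = [] := by
  match l with
  | [] => simp [pvPos]
  | [c] => simp [pvPos]
  | c :: d :: rest => simp at h

lemma pvCums_consHead (k : Int) (c : Char) (g : List Char) (gs : List (List Char)) :
    pvCums k ((c :: g) :: gs) = pvCums (k + 1) (g :: gs) := by
  cases gs with
  | nil => simp [pvCums]
  | cons g' gs' =>
      have h : k + ((g.length + 1 : Nat) : Int) = k + 1 + (g.length : Int) := by push_cast; ring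
      simp only [pvCums, List.length_cons]
      rw [h]

lemma pvPos_eq_cums (inside : Bool) (l : List Char) (k : Int) :
    pvPos k inside l = pvCums k (pvSegs inside l) := by
  induction l generalizing inside k with
  | nil => simp [pvPos, pvSegs, pvCums]
  | cons c rest ih =>
      cases rest with
      | nil => simp [pvPos, pvSegs, pvCums]
      | cons d rest' =>
          simp only [pvPos, pvSegs]
          split
          · cases hseg : pvSegs (pvTog inside c) (d :: rest') with
            | nil => exact absurd hseg (pvSegs_ne _ _)
            | cons g gs =>
                rw [ih, hseg]
                simp [pvCums]
          · cases hseg : pvSegs (pvTog inside c) (d :: rest') with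
            | nil => exact absurd hseg (pvSegs_ne _ _)
            | cons g gs =>
                rw [ih, hseg]
                simp only [pvConsHead, List.singleton_append, List.nil_append]
                rw [pvCums_consHead]

lemma pvCums_nil_imp (k : Int) (gs : List (List Char)) (h : pvCums k gs = []) :
    gs = [] ∨ ∃ g, gs = [g] := by
  match gs with
  | [] => exact Or.inl rfl
  | [g] => exact Or.inr ⟨g, rfl⟩
  | a :: b :: t => simp [pvCums] at h

-- A's position-collecting loop computes pvPos.
lemma pvLA (s : List Char) (m : Nat) : ∀ (k : Nat), s.length - k = m → ∀ (ps : List Int) (inside : Bool),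
    ∃ b, (PySem.List.pyRange (k : Int) ((s.length : Int) - 1) 1).foldl
      (fun (st : List Int × Bool) (i : Int) =>
        let inside := if PySem.List.pyGetD s i ' ' == '"' then !st.2 else st.2
        let ps := if !inside && (PySem.List.pyGetD s i ' ' == '"')
                     && (PySem.List.pyGetD s (i+1) '_' == ' ' || PySem.List.pyGetD s (i+1) '_' == '\n')
                  then st.1 ++ [i+1] else st.1
        (ps, inside)) (ps, inside)
      = (ps ++ pvPos (k : Int) inside (s.drop k), b) := by
  induction m with
  | zero =>
      intro k hk ps inside
      refine ⟨inside, ?_⟩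
      rw [PySem.List.pyRange_one_eq_nil (by omega)]
      rw [pvPos_short _ _ _ (by simp; omega)]
      simp
  | succ m ih =>
      intro k hk ps inside
      by_cases hlt : k + 1 < s.length
      · have hk1 : k < s.length := by omega
        have hk2 : k + 1 < s.length := hlt
        rw [PySem.List.pyRange_one_cons (by omega)]
        simp only [List.foldl_cons]
        have hg1 : PySem.List.pyGetD s (k : Int) ' ' = s[k] := by
          rw [PySem.List.pyGetD_natCast, List.getD_eq_getElem _ _ hk1]
        have hcast : ((k + 1 : Nat) : Int) = (k : Int) + 1 := by push_cast; ring
        have hg2 : PySem.List.pyGetD s ((k : Int) + 1) '_' = s[k+1] := by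
          rw [← hcast, PySem.List.pyGetD_natCast, List.getD_eq_getElem _ _ hk2]
        have hdrop : s.drop k = s[k] :: s[k+1] :: s.drop (k+2) := by
          rw [List.drop_eq_getElem_cons hk1, List.drop_eq_getElem_cons hk2]
        have hdrop1 : s.drop (k+1) = s[k+1] :: s.drop (k+2) := List.drop_eq_getElem_cons hk2
        obtain ⟨b, hb⟩ := ih (k+1) (by omega)
          (if !(if s[k] == '"' then !inside else inside) && (s[k] == '"')
              && (s[k+1] == ' ' || s[k+1] == '\n')
           then ps ++ [(k : Int)+1] else ps)
          (if s[k] == '"' then !inside else inside)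
        refine ⟨b, ?_⟩
        simp only [hg1, hg2]
        rw [show ((PySem.List.pyRange ((k:Int)+1) ((s.length : Int) - 1) 1)) =
              (PySem.List.pyRange (((k+1 : Nat)):Int) ((s.length : Int) - 1) 1) by rw [hcast]]
        rw [hb, hdrop, hdrop1, hcast]
        simp only [pvPos, pvTog, pvIsB]
        congr 1
        split <;> split <;> simp
      · refine ⟨inside, ?_⟩
        rw [PySem.List.pyRange_one_eq_nil (by omega)]
        rw [pvPos_short _ _ _ (by simp; omega)]
        simp

lemma pvConsHead_of_ne (gs : List (List Char)) (h : gs ≠ []) : pvConsHead [] gs = gs := by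
  cases gs with
  | nil => exact absurd rfl h
  | cons g t => simp [pvConsHead]

-- B's segmentation loop computes pvSegs.
lemma pvLB (l : List Char) : ∀ (inside : Bool) (done : List (List Char)) (cur : List Char),
    ((l.zip l.tail).foldl pvStepB (done, (cur, inside))).1
      ++ [match l.getLast? with
          | some c => ((l.zip l.tail).foldl pvStepB (done, (cur, inside))).2.1 ++ [c]
          | none => ((l.zip l.tail).foldl pvStepB (done, (cur, inside))).2.1]
    = done ++ pvConsHead cur (pvSegs inside l) := by
  induction l with
  | nil => intro inside done cur; simp [pvSegs, pvConsHead]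
  | cons c rest ih =>
      intro inside done cur
      cases rest with
      | nil => simp [pvSegs, pvConsHead]
      | cons d rest' =>
          have hz : (c :: d :: rest').zip (c :: d :: rest').tail
              = (c, d) :: ((d :: rest').zip (d :: rest').tail) := by simp
          have hlast : (c :: d :: rest').getLast? = (d :: rest').getLast? := by
            simp [List.getLast?_cons_cons]
          simp only [hz, List.foldl_cons, hlast]
          have hstep : pvStepB (done, (cur, inside)) (c, d)
              = if pvIsB (pvTog inside c) c d then (done ++ [cur ++ [c]], ([], pvTog inside c))
                else (done, (cur ++ [c], pvTog inside c)) := by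
            simp only [pvStepB, pvTog, pvIsB]
            cases inside <;> simp
          rw [hstep]
          by_cases hB : pvIsB (pvTog inside c) c d
          · rw [if_pos hB]
            rw [ih (pvTog inside c) (done ++ [cur ++ [c]]) []]
            rw [pvConsHead_of_ne _ (pvSegs_ne _ _)]
            simp only [pvSegs]
            rw [if_pos hB]
            simp [pvConsHead]
          · rw [if_neg hB]
            rw [ih (pvTog inside c) done (cur ++ [c])]
            simp only [pvSegs]
            rw [if_neg hB, pvConsHead_assoc]

lemma pvInsert_at_prefix (a x : List Char) :
    PySem.List.insert (a ++ x) (a.length : Int) ',' = a ++ ',' :: x := by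
  have h : ¬ ((a.length : Int) < 0) := by omega
  simp [PySem.List.insert, PySem.List.sliceIndices, h]

-- Splicing commas (largest position first) at all but the last cumulative boundary
-- is joining all but the last segment with commas.
lemma pvL3 (gs : List (List Char)) : ∀ (pre : List Char), gs ≠ [] →
    List.foldr (fun p acc => PySem.List.insert acc p ',') (pre ++ gs.flatten)
      ((pvCums (pre.length : Int) gs).dropLast)
    = pre ++ PySem.Chars.join [','] gs.dropLast ++ gs.getLastD [] := by
  induction gs with
  | nil => intro pre h; exact absurd rfl h
  | cons g gs' ih =>
      intro pre _
      cases gs' with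
      | nil => simp [pvCums, PySem.Chars.join_nil]
      | cons g' gs'' =>
          cases gs'' with
          | nil =>
              simp [pvCums, PySem.Chars.join_singleton]
          | cons g3 t =>
              have hcums : pvCums ((pre.length : Int)) (g :: g' :: g3 :: t)
                  = ((pre.length : Int) + g.length) :: pvCums ((pre.length : Int) + g.length) (g' :: g3 :: t) := by
                simp [pvCums]
              have hne2 : pvCums ((pre.length : Int) + g.length) (g' :: g3 :: t) ≠ [] := by
                simp [pvCums]
              rw [hcums, List.dropLast_cons_of_ne_nil (by
                intro h; exact hne2 (by simpa using h))]
              simp only [List.foldr_cons]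
              have hlen : ((pre.length : Int) + g.length) = (((pre ++ g).length : Nat) : Int) := by
                push_cast [List.length_append]; ring
              have hflat : pre ++ (g :: g' :: g3 :: t).flatten = (pre ++ g) ++ (g' :: g3 :: t).flatten := by
                simp
              rw [hflat, hlen, ih (pre ++ g) (by simp)]
              rw [List.append_assoc (pre ++ g)] at *
              rw [show (pre ++ g) ++ (PySem.Chars.join [','] (g' :: g3 :: t).dropLast ++ (g' :: g3 :: t).getLastD [])
                    = (pre ++ g) ++ (PySem.Chars.join [','] (g' :: g3 :: t).dropLast ++ (g' :: g3 :: t).getLastD []) from rfl]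
              rw [pvInsert_at_prefix (pre ++ g)]
              have hdl : (g :: g' :: g3 :: t).dropLast = g :: (g' :: g3 :: t).dropLast := by
                simp
              rw [hdl]
              have hdl2 : (g' :: g3 :: t).dropLast = g' :: (g3 :: t).dropLast := by simp
              rw [hdl2, PySem.Chars.join_cons_cons]
              simp

lemma pvGetNegOne (l : List Char) : PySem.List.pyGet? l (-1) = l.getLast? := by
  simp [pysem]

-- ===== VERDICT (by name: the statement is the Claim_ definition above) =====
theorem fix_json_string_spec : Claim_equal_fix_json_string := by
  intro js _
  unfold Spec_fix_json_string
  simp only [fix_json_string, fix_json_string_alt]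
  generalize (PySem.Str.replace (PySem.Str.replace js "```json" "") "```" "").toList = l
  obtain ⟨b, hA⟩ := pvLA l l.length 0 (by simp) [] false
  simp only [Nat.cast_zero, List.drop_zero, List.nil_append] at hA
  have hB := pvLB l false [] []
  simp only [List.nil_append] at hB
  rw [pvConsHead_of_ne _ (pvSegs_ne false l)] at hB
  rw [PySem.List.slice_from l (by norm_num), show ((1:Int).toNat) = 1 from rfl, List.drop_one]
  rw [pvGetNegOne, hA, hB]
  dsimp only
  rw [pvPos_eq_cums]
  by_cases hnil : pvCums 0 (pvSegs false l) = []
  · rw [if_neg (by simp [hnil])]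
    rcases pvCums_nil_imp _ _ hnil with h | ⟨g, hg⟩
    · exact absurd h (pvSegs_ne false l)
    · have hfl := pvSegs_flatten false l
      rw [hg] at hfl ⊢
      simp only [List.flatten_cons, List.flatten_nil, List.append_nil] at hfl
      simp [hfl, PySem.Chars.join_nil]
  · rw [if_pos (by simp [hnil])]
    congr 1
    simp only [List.foldl_reverse]
    have h3 := pvL3 (pvSegs false l) [] (pvSegs_ne false l)
    simp only [List.length_nil, Nat.cast_zero, List.nil_append, pvSegs_flatten] at h3
    rw [h3]
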